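-- pv_equiv track=rewrite | github.com/gloryi/agile_stocks_analyzer | __legacy_chtonic.py | analyzeHASequence
-- ===== SOURCE A (Python) =====
-- def analyzeHASequence(sequence, targetColor, minSignal, minSetup):
--     if targetColor != sequence[0]:
--         return False
--     idx = 0
--     p1 = 0
--     while idx < len(sequence) and sequence[idx] == targetColor:
--         idx += 1
--     p2 = idx
--     while idx < len(sequence) and sequence[idx] != targetColor:
--         idx += 1
--     p3 = idx
--
--     D1 = p2 - p1
--     D2 = p3 - p2
--
--     if D1 < minSignal:
--         return False
--     if D2 >= minSetup or p2 + D2 >= len(sequence):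
--         return True
--     return False
-- ===== SOURCE B (Python) =====
-- def analyzeHASequence(sequence, targetColor, minSignal, minSetup):
--     if targetColor != sequence[0]:
--         return False
--     # run-length encode the whole sequence keyed on equality-to-targetColor
--     runs = []
--     for c in sequence:
--         f = (c == targetColor)
--         if runs and runs[-1][0] == f:
--             runs[-1][1] += 1
--         else:
--             runs.append([f, 1])
--     d1 = runs[0][1]
--     d2 = runs[1][1] if len(runs) > 1 else 0
--     return d1 >= minSignal and (d2 >= minSetup or d1 + d2 >= len(sequence))
-- ===== Notes on version B (the rewrite author's own statement) =====
-- stated objective: alternative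
-- what changed: Replaces A's two index-advancing while loops and pointer arithmetic by a single run-length-encoding fold that builds the list of (flag, length) runs keyed on equality-to-targetColor, then reads the first two run lengths.
import Mathlib
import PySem

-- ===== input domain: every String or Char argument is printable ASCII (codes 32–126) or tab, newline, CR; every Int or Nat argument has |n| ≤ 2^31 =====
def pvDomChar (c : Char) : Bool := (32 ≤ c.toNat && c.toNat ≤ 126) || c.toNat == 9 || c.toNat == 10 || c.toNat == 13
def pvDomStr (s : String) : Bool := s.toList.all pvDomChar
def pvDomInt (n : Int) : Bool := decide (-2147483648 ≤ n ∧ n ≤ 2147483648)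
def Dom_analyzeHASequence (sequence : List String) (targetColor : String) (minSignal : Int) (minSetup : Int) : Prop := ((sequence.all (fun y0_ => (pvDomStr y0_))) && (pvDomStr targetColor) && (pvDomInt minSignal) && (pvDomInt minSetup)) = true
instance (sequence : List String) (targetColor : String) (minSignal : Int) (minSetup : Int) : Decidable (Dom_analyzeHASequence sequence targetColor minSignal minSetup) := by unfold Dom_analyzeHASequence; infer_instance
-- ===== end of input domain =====

-- B replaces A's two index-advancing while loops by a single run-length-encoding fold
-- (build the list of (flag, length) runs keyed on equality-to-targetColor, then read the
-- first two run lengths); alternative decomposition, same O(n) cost.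

-- ===== PORT A =====
-- 'while idx < len(sequence) and sequence[idx] == targetColor: idx += 1'
def pvLoopEq (seq : List String) (t : String) (idx : Nat) : Nat :=
  if h : idx < seq.length then
    if seq[idx] = t then pvLoopEq seq t (idx + 1) else idx
  else idx
termination_by seq.length - idx

-- 'while idx < len(sequence) and sequence[idx] != targetColor: idx += 1'
def pvLoopNe (seq : List String) (t : String) (idx : Nat) : Nat :=
  if h : idx < seq.length then
    if seq[idx] ≠ t then pvLoopNe seq t (idx + 1) else idx
  else idx
termination_by seq.length - idx

def analyzeHASequence (sequence : List String) (targetColor : String) (minSignal : Int) (minSetup : Int) : Bool :=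
  match PySem.List.pyGet? sequence 0 with
  | none => false   -- Python raises IndexError here (empty list); excluded by Pre_
  | some s0 =>
    if targetColor ≠ s0 then false
    else
      let p1 : Nat := 0
      let p2 : Nat := pvLoopEq sequence targetColor 0
      let p3 : Nat := pvLoopNe sequence targetColor p2
      let D1 : Int := (p2 : Int) - (p1 : Int)
      let D2 : Int := (p3 : Int) - (p2 : Int)
      if D1 < minSignal then false
      else if D2 ≥ minSetup ∨ (p2 : Int) + D2 ≥ (sequence.length : Int) then true
      else false

-- ===== PORT B =====
-- one step of B's run-length-encoding loop; the runs list is kept in reverse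
-- (head = Python's runs[-1]), the functional transcription of append/mutate-last
def pvStep (t : String) (acc : List (Bool × Int)) (c : String) : List (Bool × Int) :=
  let f := c == t
  match acc with
  | (g, n) :: rest => if g == f then (g, n + 1) :: rest else (f, 1) :: (g, n) :: rest
  | [] => [(f, 1)]

def analyzeHASequence_alt (sequence : List String) (targetColor : String) (minSignal : Int) (minSetup : Int) : Bool :=
  match PySem.List.pyGet? sequence 0 with
  | none => false   -- Python raises IndexError here (empty list); excluded by Pre_
  | some s0 =>
    if targetColor ≠ s0 then false
    else
      let runs : List (Bool × Int) := (sequence.foldl (pvStep targetColor) []).reverse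
      -- runs[0][1]: runs is nonempty here since sequence is (guard passed); default unreachable
      let d1 : Int := match runs with | (_, n) :: _ => n | [] => 0
      -- runs[1][1] if len(runs) > 1 else 0
      let d2 : Int := match runs with | _ :: (_, n) :: _ => n | _ => 0
      decide (d1 ≥ minSignal) && (decide (d2 ≥ minSetup) || decide (d1 + d2 ≥ (sequence.length : Int)))

-- ===== PRECONDITION & SPEC =====
-- A (and B) evaluate sequence[0] first: the empty list raises IndexError, so it is excluded.
def Pre_analyzeHASequence (sequence : List String) (targetColor : String) (minSignal : Int) (minSetup : Int) : Prop :=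
  sequence ≠ []
instance (sequence : List String) (targetColor : String) (minSignal : Int) (minSetup : Int) : Decidable (Pre_analyzeHASequence sequence targetColor minSignal minSetup) := by unfold Pre_analyzeHASequence; infer_instance

def pvWitness_analyzeHASequence : List String × String × Int × Int := (["g", "g", "r", "g"], "g", 2, 1)

def Spec_analyzeHASequence (sequence : List String) (targetColor : String) (minSignal : Int) (minSetup : Int) (out : Bool) : Prop := out = analyzeHASequence_alt sequence targetColor minSignal minSetup
instance (sequence : List String) (targetColor : String) (minSignal : Int) (minSetup : Int) (out : Bool) : Decidable (Spec_analyzeHASequence sequence targetColor minSignal minSetup out) := by unfold Spec_analyzeHASequence; infer_instance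

-- ===== CLAIM (what is proved, stated in full; the proofs are below) =====
def Claim_equal_analyzeHASequence : Prop := ∀ (sequence : List String) (targetColor : String) (minSignal : Int) (minSetup : Int), Dom_analyzeHASequence sequence targetColor minSignal minSetup → Pre_analyzeHASequence sequence targetColor minSignal minSetup → Spec_analyzeHASequence sequence targetColor minSignal minSetup (analyzeHASequence sequence targetColor minSignal minSetup)

-- ===== LEMMAS AND PROOFS =====

-- A's first while loop computes idx + length of the target-run starting at idx.
lemma pvLoopEq_eq (seq : List String) (t : String) (idx : Nat) :
    pvLoopEq seq t idx = idx + ((seq.drop idx).takeWhile (fun c => c == t)).length := by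
  fun_induction pvLoopEq seq t idx with
  | case1 idx h heq ih =>
    rw [ih, List.drop_eq_getElem_cons h, List.takeWhile_cons]
    simp [heq]; omega
  | case2 idx h heq =>
    rw [List.drop_eq_getElem_cons h, List.takeWhile_cons]
    simp [heq]
  | case3 idx h =>
    rw [List.drop_eq_nil_of_le (by omega)]
    simp

-- A's second while loop computes idx + length of the non-target-run starting at idx.
lemma pvLoopNe_eq (seq : List String) (t : String) (idx : Nat) :
    pvLoopNe seq t idx = idx + ((seq.drop idx).takeWhile (fun c => !(c == t))).length := by
  fun_induction pvLoopNe seq t idx with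
  | case1 idx h heq ih =>
    rw [ih, List.drop_eq_getElem_cons h, List.takeWhile_cons]
    simp [heq]; omega
  | case2 idx h heq =>
    rw [List.drop_eq_getElem_cons h, List.takeWhile_cons]
    simp [heq]
  | case3 idx h =>
    rw [List.drop_eq_nil_of_le (by omega)]
    simp

-- drop past the takeWhile prefix is dropWhile
lemma drop_takeWhile_len {α : Type} (p : α → Bool) (l : List α) :
    l.drop (l.takeWhile p).length = l.dropWhile p := by
  induction l with
  | nil => rfl
  | cons x xs ih =>
    cases h : p x <;> simp [h, ih]

-- While the head run's flag keeps matching, the fold only increments the head's count.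
lemma pvStep_absorb (xs : List String) (t : String) (b : Bool) :
    ∀ (n : Int) (acc : List (Bool × Int)),
    List.foldl (pvStep t) ((b, n) :: acc) xs
      = List.foldl (pvStep t) ((b, n + ((xs.takeWhile (fun c => (c == t) == b)).length : Int)) :: acc)
          (xs.dropWhile (fun c => (c == t) == b)) := by
  induction xs with
  | nil => intro n acc; simp
  | cons y ys ih =>
    intro n acc
    rw [List.foldl_cons, List.takeWhile_cons, List.dropWhile_cons]
    by_cases h : ((y == t) == b) = true
    · have hb : (y == t) = b := by simpa using h
      have hstep : pvStep t ((b, n) :: acc) y = (b, n + 1) :: acc := by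
        simp [pvStep, hb]
      rw [if_pos h, if_pos h, hstep, ih]
      congr 2
      simp only [Prod.mk.injEq, List.length_cons]
      refine ⟨trivial, ?_⟩
      push_cast
      ring
    · have hb : ((y == t) == b) = false := by simpa using h
      rw [if_neg (by simp [hb]), if_neg (by simp [hb])]
      simp

-- The fold never touches anything below the current head run.
lemma pvStep_suffix (xs : List String) (t : String) :
    ∀ (a : Bool × Int) (acc : List (Bool × Int)),
    ∃ res : List (Bool × Int), List.foldl (pvStep t) (a :: acc) xs = res ++ acc ∧ res ≠ [] := by
  induction xs with
  | nil => intro a acc; exact ⟨[a], rfl, by simp⟩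
  | cons y ys ih =>
    intro a acc
    obtain ⟨g, n⟩ := a
    by_cases h : (g == (y == t)) = true
    · have hstep : pvStep t ((g, n) :: acc) y = (g, n + 1) :: acc := by simp [pvStep, h]
      rw [List.foldl_cons, hstep]; exact ih _ acc
    · have hstep : pvStep t ((g, n) :: acc) y = ((y == t), 1) :: (g, n) :: acc := by
        simp only [pvStep]
        rw [if_neg (by simpa using h)]
      rw [List.foldl_cons, hstep]
      obtain ⟨res, hres, hne⟩ := ih ((y == t), 1) ((g, n) :: acc)
      exact ⟨res ++ [(g, n)], by simpa using hres, by simp⟩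

-- ===== VERDICT (by name: the statement is the Claim_ definition above) =====
theorem analyzeHASequence_spec : Claim_equal_analyzeHASequence := by
  intro seq t s1 s2 _hdom hpre
  unfold Spec_analyzeHASequence
  obtain ⟨s0, ss, rfl⟩ := List.exists_cons_of_ne_nil hpre
  unfold analyzeHASequence analyzeHASequence_alt
  have hget : PySem.List.pyGet? (s0 :: ss) (0 : Int) = some s0 := by simp
  rw [hget]
  dsimp only
  by_cases ht : t = s0
  · subst ht
    have hne : ¬ (t ≠ t) := fun h => h rfl
    rw [if_neg hne, if_neg hne]
    set seqL := t :: ss with hseq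
    -- A-side run lengths
    have hpredT : (fun c : String => (c == t) == true) = (fun c : String => c == t) := by
      funext c; simp
    have hpredF : (fun c : String => (c == t) == false) = (fun c : String => !(c == t)) := by
      funext c; cases (c == t) <;> simp
    set a1 := (ss.takeWhile (fun c => c == t)).length with ha1
    have hp2 : pvLoopEq seqL t 0 = 1 + a1 := by
      rw [pvLoopEq_eq]; simp [hseq]; omega
    set rest := ss.dropWhile (fun c => c == t) with hrest
    have hdropA : seqL.drop (1 + a1) = rest := by
      simp only [hseq, ha1, hrest]
      rw [Nat.add_comm, List.drop_succ_cons, drop_takeWhile_len]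
    have hp3 : pvLoopNe seqL t (1 + a1) = (1 + a1) + (rest.takeWhile (fun c => !(c == t))).length := by
      rw [pvLoopNe_eq, hdropA]
    -- B-side fold: the first step pushes the (true, 1) run, then absorb the rest of run 1
    have hfold1 : seqL.foldl (pvStep t) [] = List.foldl (pvStep t) [(true, 1 + (a1 : Int))] rest := by
      have h0 : pvStep t [] t = [(true, 1)] := by simp [pvStep]
      rw [hseq, List.foldl_cons, h0,
          pvStep_absorb ss t true 1 [], hpredT, ← ha1, ← hrest]
    rw [hp2, hp3, hfold1]
    -- now case on rest
    cases hr : rest with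
    | nil =>
      simp only [List.foldl_nil, List.reverse_cons, List.reverse_nil, List.nil_append]
      simp only [List.takeWhile_nil, List.length_nil]
      split_ifs with h1 h2 <;> simp_all
    | cons r rs =>
      have hrflag : (r == t) = false := by
        have h := List.head?_dropWhile_not (fun c => c == t) ss
        rw [← hrest, hr] at h
        simpa using h
      have hstep2 : pvStep t [(true, 1 + (a1 : Int))] r = [((r == t), 1), (true, 1 + (a1 : Int))] := by
        simp [pvStep, hrflag]
      set a2 := (rs.takeWhile (fun c => !(c == t))).length with ha2
      have htw : ((r :: rs).takeWhile (fun c => !(c == t))).length = 1 + a2 := by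
        rw [List.takeWhile_cons]; simp [hrflag, ha2]; omega
      have habs2 : List.foldl (pvStep t) [((r == t), 1), (true, 1 + (a1 : Int))] rs
          = List.foldl (pvStep t) [(false, 1 + (a2 : Int)), (true, 1 + (a1 : Int))]
              (rs.dropWhile (fun c => !(c == t))) := by
        rw [hrflag, pvStep_absorb rs t false 1 [(true, 1 + (a1 : Int))], hpredF, ← ha2]
      rw [List.foldl_cons, hstep2, habs2, htw]
      cases hx : rs.dropWhile (fun c => !(c == t)) with
      | nil =>
        simp only [List.foldl_nil, List.reverse_cons, List.reverse_nil, List.nil_append,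
          List.cons_append]
        split_ifs with h1 h2 <;> simp_all
      | cons y ys =>
        have hyflag : (y == t) = true := by
          have h := List.head?_dropWhile_not (fun c => !(c == t)) rs
          rw [hx] at h
          simpa using h
        have hstep3 : pvStep t [(false, 1 + (a2 : Int)), (true, 1 + (a1 : Int))] y
            = [((y == t), 1), (false, 1 + (a2 : Int)), (true, 1 + (a1 : Int))] := by
          simp [pvStep, hyflag]
        obtain ⟨res, hres, hresne⟩ :=
          pvStep_suffix ys t ((y == t), 1) [(false, 1 + (a2 : Int)), (true, 1 + (a1 : Int))]
        rw [List.foldl_cons, hstep3, hres, List.reverse_append]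
        simp only [List.reverse_cons, List.reverse_nil, List.nil_append, List.cons_append]
        split_ifs with h1 h2 <;> simp_all
  · rw [if_pos ht, if_pos ht]
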